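-- pv_equiv track=rewrite | github.com/oleksandkov/Learning-assistent | MATH/LABA6/laba6.py | graph_stats
-- ===== SOURCE A (Python) =====
-- from typing import List
--
-- def graph_stats(adj: List[List[int]], gtype: str) -> str:
--     """Статистика графа за матрицею суміжності."""
--     n = len(adj)
--     if not n:
--         return 'Граф порожній'
--     loops = sum(1 for i in range(n) if adj[i][i])
--     if gtype == 'undirected':
--         edges = sum(adj[i][j] for i in range(n) for j in range(i+1, n))
--     else:
--         edges = sum(adj[i][j] for i in range(n) for j in range(n) if i != j)
--
--     lines = ['Аналіз графа', '─' * 35]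
--     lines.append(f'Вершин (n): {n}   Ребер/дуг: {edges}   Петель: {loops}')
--     lines.append('─' * 35)
--     lines.append('Степені вершин:')
--
--     for i in range(n):
--         lp = ' ⟲' if adj[i][i] else ''
--         if gtype == 'directed':
--             out_d = sum(adj[i][j] for j in range(n) if j != i)
--             in_d  = sum(adj[k][i] for k in range(n) if k != i)
--             G      = [f'x{j+1}' for j in range(n) if j != i and adj[i][j]]
--             G_inv  = [f'x{k+1}' for k in range(n) if k != i and adj[k][i]]
--             lines.append(f'  x{i+1}{lp}: вихід={out_d} Г={G}')
--             lines.append(f'       захід={in_d} Г⁻¹={G_inv}')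
--         else:
--             deg  = sum(adj[i][j] for j in range(n) if j != i)
--             nbrs = [f'x{j+1}' for j in range(n) if j != i and adj[i][j]]
--             lines.append(f'  x{i+1}{lp}: deg={deg}  Г={nbrs}')
--
--     if gtype == 'undirected' and edges > 0:
--         total_deg = sum(sum(adj[i][j] for j in range(n) if j != i) for i in range(n))
--         lines.append('─' * 35)
--         lines.append(f'Сума степенів = {total_deg} = 2 × {edges} ✓')
--     return '\n'.join(lines)
-- ===== SOURCE B (Python) =====
-- from typing import List
--
--
-- def graph_stats(adj: List[List[int]], gtype: str) -> str:
--     n = len(adj)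
--     if n == 0:
--         return 'Граф порожній'
--     # one row-major pass over all cells, scattering into per-vertex tables
--     out_d = [0] * n
--     in_d = [0] * n
--     out_nb = [[] for _ in range(n)]
--     in_nb = [[] for _ in range(n)]
--     loops = 0
--     tri = 0
--     for i in range(n):
--         for j in range(n):
--             v = adj[i][j]
--             if i == j:
--                 if v:
--                     loops += 1
--             else:
--                 out_d[i] += v
--                 in_d[j] += v
--                 if j > i:
--                     tri += v
--                 if v:
--                     out_nb[i].append('x%d' % (j + 1))
--                     in_nb[j].append('x%d' % (i + 1))
--     edges = tri if gtype == 'undirected' else sum(out_d)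
--     bar = '─' * 35
--     lines = ['Аналіз графа', bar,
--              f'Вершин (n): {n}   Ребер/дуг: {edges}   Петель: {loops}',
--              bar, 'Степені вершин:']
--     for i in range(n):
--         lp = ' ⟲' if adj[i][i] else ''
--         if gtype == 'directed':
--             lines.append(f'  x{i+1}{lp}: вихід={out_d[i]} Г={out_nb[i]}')
--             lines.append(f'       захід={in_d[i]} Г⁻¹={in_nb[i]}')
--         else:
--             lines.append(f'  x{i+1}{lp}: deg={out_d[i]}  Г={out_nb[i]}')
--     if gtype == 'undirected' and edges > 0:
--         lines.append(bar)
--         lines.append(f'Сума степенів = {sum(out_d)} = 2 × {edges} ✓')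
--     return '\n'.join(lines)
-- ===== Notes on version B (the rewrite author's own statement) =====
-- stated objective: alternative
-- what changed: A re-scans the matrix separately for the edge count, the loop count, each vertex's out/in degree and neighbour lists, and the footer degree total; B makes ONE row-major pass over all cells that scatters each entry into per-vertex tables (out/in degree arrays, out/in neighbour-label arrays, a loop counter and an upper-triangle edge sum) and then a separate formatting pass that only reads the tables (edges and the footer total are read off as the sum of the out-degree table).
-- outside the precondition, e.g. on graph_stats([[1, 0], [0]], 'undirected'): A raises IndexError, B raises IndexError
import Mathlib
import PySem

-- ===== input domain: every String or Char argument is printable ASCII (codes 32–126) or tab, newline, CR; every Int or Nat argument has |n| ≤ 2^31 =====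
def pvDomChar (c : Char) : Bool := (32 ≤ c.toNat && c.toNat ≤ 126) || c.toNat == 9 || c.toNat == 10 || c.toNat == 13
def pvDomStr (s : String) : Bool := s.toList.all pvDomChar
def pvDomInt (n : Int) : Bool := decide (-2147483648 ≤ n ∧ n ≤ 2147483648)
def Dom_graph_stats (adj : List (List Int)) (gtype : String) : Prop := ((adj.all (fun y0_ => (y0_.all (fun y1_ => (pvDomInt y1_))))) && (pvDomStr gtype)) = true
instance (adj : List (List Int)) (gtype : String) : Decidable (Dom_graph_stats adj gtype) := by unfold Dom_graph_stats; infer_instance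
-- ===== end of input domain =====

-- B replaces A's three independent re-scans of the matrix (edge count, loop count, per-vertex degree
-- and neighbour scans, footer degree total) by ONE row-major pass over all cells that scatters into
-- per-vertex tables (out/in degree arrays, out/in neighbour-label arrays, loop and triangle counters),
-- followed by a separate formatting pass that only reads the tables; same asymptotic cost.

-- shared primitives: matrix access adj[i][j], the '─'*35 bar, Python's repr of a list of strings
def pvAt (adj : List (List Int)) (i j : Int) : Int :=
  PySem.List.pyGetD (PySem.List.pyGetD adj i []) j 0

def pvBar : String := String.ofList (List.replicate 35 '─')

def pvReprStrList (xs : List String) : String :=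
  "[" ++ String.intercalate ", " (xs.map (fun s => "'" ++ s ++ "'")) ++ "]"

-- ===== PORT A =====
def graph_stats (adj : List (List Int)) (gtype : String) : String :=
  let n : Int := PySem.List.len adj
  if n = 0 then "Граф порожній" else
  let loops : Int := (PySem.List.pyRange 0 n 1).foldl
    (fun a i => if pvAt adj i i ≠ 0 then a + 1 else a) 0
  let edges : Int :=
    if gtype = "undirected" then
      (PySem.List.pyRange 0 n 1).foldl (fun a i =>
        (PySem.List.pyRange (i + 1) n 1).foldl (fun b j => b + pvAt adj i j) a) 0
    else
      (PySem.List.pyRange 0 n 1).foldl (fun a i =>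
        (PySem.List.pyRange 0 n 1).foldl (fun b j => if j ≠ i then b + pvAt adj i j else b) a) 0
  let lines : List String :=
    ["Аналіз графа", pvBar,
     "Вершин (n): " ++ PySem.Int.toStr n ++ "   Ребер/дуг: " ++ PySem.Int.toStr edges ++
       "   Петель: " ++ PySem.Int.toStr loops,
     pvBar, "Степені вершин:"]
  let lines := (PySem.List.pyRange 0 n 1).foldl (fun ls i =>
    let lp : String := if pvAt adj i i ≠ 0 then " ⟲" else ""
    if gtype = "directed" then
      let out_d : Int := (PySem.List.pyRange 0 n 1).foldl
        (fun a j => if j ≠ i then a + pvAt adj i j else a) 0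
      let in_d : Int := (PySem.List.pyRange 0 n 1).foldl
        (fun a k => if k ≠ i then a + pvAt adj k i else a) 0
      let G : List String := (PySem.List.pyRange 0 n 1).foldl
        (fun a j => if j ≠ i ∧ pvAt adj i j ≠ 0 then a ++ ["x" ++ PySem.Int.toStr (j + 1)] else a) []
      let Ginv : List String := (PySem.List.pyRange 0 n 1).foldl
        (fun a k => if k ≠ i ∧ pvAt adj k i ≠ 0 then a ++ ["x" ++ PySem.Int.toStr (k + 1)] else a) []
      ls ++ ["  x" ++ PySem.Int.toStr (i + 1) ++ lp ++ ": вихід=" ++ PySem.Int.toStr out_d ++ " Г=" ++ pvReprStrList G,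
             "       захід=" ++ PySem.Int.toStr in_d ++ " Г⁻¹=" ++ pvReprStrList Ginv]
    else
      let deg : Int := (PySem.List.pyRange 0 n 1).foldl
        (fun a j => if j ≠ i then a + pvAt adj i j else a) 0
      let nbrs : List String := (PySem.List.pyRange 0 n 1).foldl
        (fun a j => if j ≠ i ∧ pvAt adj i j ≠ 0 then a ++ ["x" ++ PySem.Int.toStr (j + 1)] else a) []
      ls ++ ["  x" ++ PySem.Int.toStr (i + 1) ++ lp ++ ": deg=" ++ PySem.Int.toStr deg ++ "  Г=" ++ pvReprStrList nbrs]) lines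
  let lines :=
    if gtype = "undirected" ∧ edges > 0 then
      let total_deg : Int := (PySem.List.pyRange 0 n 1).foldl (fun a i =>
        a + (PySem.List.pyRange 0 n 1).foldl (fun b j => if j ≠ i then b + pvAt adj i j else b) 0) 0
      lines ++ [pvBar, "Сума степенів = " ++ PySem.Int.toStr total_deg ++ " = 2 × " ++ PySem.Int.toStr edges ++ " ✓"]
    else lines
  PySem.Str.join "\n" lines

-- ===== PORT B =====
-- Source B: one row-major pass over every cell (i, j), scattering into six accumulators:
-- out-degree table, in-degree table, out-neighbour labels, in-neighbour labels, loop count,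
-- upper-triangle edge sum; then a formatting pass that only reads the tables.
-- Python's 'tbl[k] += v' / 'tbl[k].append(s)' is PySem.List.pySetD/pyGetD (exact: 0 ≤ k < len(tbl)).
def graph_stats_alt (adj : List (List Int)) (gtype : String) : String :=
  let n : Int := PySem.List.len adj
  if n = 0 then "Граф порожній" else
  let st0 : (List Int × List Int) × (List (List String) × List (List String)) × Int × Int :=
    ((List.replicate n.toNat 0, List.replicate n.toNat 0),
     (List.replicate n.toNat [], List.replicate n.toNat []), 0, 0)
  let st := (PySem.List.pyRange 0 n 1).foldl (fun st i =>
    (PySem.List.pyRange 0 n 1).foldl (fun st j =>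
      let v := pvAt adj i j
      if i = j then
        (if v ≠ 0 then (st.1, st.2.1, st.2.2.1 + 1, st.2.2.2) else st)
      else
        ((PySem.List.pySetD st.1.1 i (PySem.List.pyGetD st.1.1 i 0 + v),
          PySem.List.pySetD st.1.2 j (PySem.List.pyGetD st.1.2 j 0 + v)),
         (if v ≠ 0 then
            (PySem.List.pySetD st.2.1.1 i (PySem.List.pyGetD st.2.1.1 i [] ++ ["x" ++ PySem.Int.toStr (j + 1)]),
             PySem.List.pySetD st.2.1.2 j (PySem.List.pyGetD st.2.1.2 j [] ++ ["x" ++ PySem.Int.toStr (i + 1)]))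
          else st.2.1),
         st.2.2.1,
         (if j > i then st.2.2.2 + v else st.2.2.2))) st) st0
  let outD := st.1.1
  let inD := st.1.2
  let outNb := st.2.1.1
  let inNb := st.2.1.2
  let loops := st.2.2.1
  let tri := st.2.2.2
  let edges : Int := if gtype = "undirected" then tri else outD.sum
  let lines : List String :=
    ["Аналіз графа", pvBar,
     "Вершин (n): " ++ PySem.Int.toStr n ++ "   Ребер/дуг: " ++ PySem.Int.toStr edges ++
       "   Петель: " ++ PySem.Int.toStr loops,
     pvBar, "Степені вершин:"]
  let lines := (PySem.List.pyRange 0 n 1).foldl (fun ls i =>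
    let lp : String := if pvAt adj i i ≠ 0 then " ⟲" else ""
    if gtype = "directed" then
      ls ++ ["  x" ++ PySem.Int.toStr (i + 1) ++ lp ++ ": вихід=" ++ PySem.Int.toStr (PySem.List.pyGetD outD i 0) ++
               " Г=" ++ pvReprStrList (PySem.List.pyGetD outNb i []),
             "       захід=" ++ PySem.Int.toStr (PySem.List.pyGetD inD i 0) ++
               " Г⁻¹=" ++ pvReprStrList (PySem.List.pyGetD inNb i [])]
    else
      ls ++ ["  x" ++ PySem.Int.toStr (i + 1) ++ lp ++ ": deg=" ++ PySem.Int.toStr (PySem.List.pyGetD outD i 0) ++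
               "  Г=" ++ pvReprStrList (PySem.List.pyGetD outNb i [])]) lines
  let lines :=
    if gtype = "undirected" ∧ edges > 0 then
      lines ++ [pvBar, "Сума степенів = " ++ PySem.Int.toStr outD.sum ++ " = 2 × " ++ PySem.Int.toStr edges ++ " ✓"]
    else lines
  PySem.Str.join "\n" lines

-- ===== PRECONDITION & SPEC =====
-- Pre_: Python A raises IndexError exactly when some row is shorter than n = len(adj)
-- (every row is indexed at its diagonal and at all columns < n); nothing else is excluded.
def Pre_graph_stats (adj : List (List Int)) (_gtype : String) : Prop :=
  ∀ row ∈ adj, adj.length ≤ row.length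
instance (adj : List (List Int)) (gtype : String) : Decidable (Pre_graph_stats adj gtype) := by
  unfold Pre_graph_stats; infer_instance

def pvWitness_graph_stats : List (List Int) × String := ([[1, 0], [0, 1]], "undirected")

def Spec_graph_stats (adj : List (List Int)) (gtype : String) (out : String) : Prop := out = graph_stats_alt adj gtype
instance (adj : List (List Int)) (gtype : String) (out : String) : Decidable (Spec_graph_stats adj gtype out) := by unfold Spec_graph_stats; infer_instance

-- ===== CLAIM (what is proved, stated in full; the proofs are below) =====
def Claim_equal_graph_stats : Prop := ∀ (adj : List (List Int)) (gtype : String), Dom_graph_stats adj gtype → Pre_graph_stats adj gtype → Spec_graph_stats adj gtype (graph_stats adj gtype)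

-- ===== LEMMAS AND PROOFS =====

-- matrix access at Nat indices
def pvA (adj : List (List Int)) (i j : Nat) : Int := pvAt adj i j

-- the cell list of the row-major pass
def pvCells (N : Nat) : List (Nat × Nat) :=
  (List.range N).flatMap (fun i => (List.range N).map (fun j => (i, j)))

-- the six componentwise step functions of B's single pass
def pvFOD (adj : List (List Int)) (a : List Int) (c : Nat × Nat) : List Int :=
  if ¬ c.1 = c.2 then a.set c.1 (a.getD c.1 0 + pvA adj c.1 c.2) else a
def pvFID (adj : List (List Int)) (a : List Int) (c : Nat × Nat) : List Int :=
  if ¬ c.1 = c.2 then a.set c.2 (a.getD c.2 0 + pvA adj c.1 c.2) else a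
def pvFON (adj : List (List Int)) (a : List (List String)) (c : Nat × Nat) : List (List String) :=
  if ¬ c.1 = c.2 ∧ pvA adj c.1 c.2 ≠ 0 then a.set c.1 (a.getD c.1 [] ++ ["x" ++ PySem.Int.toStr ((c.2 : Int) + 1)]) else a
def pvFIN (adj : List (List Int)) (a : List (List String)) (c : Nat × Nat) : List (List String) :=
  if ¬ c.1 = c.2 ∧ pvA adj c.1 c.2 ≠ 0 then a.set c.2 (a.getD c.2 [] ++ ["x" ++ PySem.Int.toStr ((c.1 : Int) + 1)]) else a
def pvFL (adj : List (List Int)) (a : Int) (c : Nat × Nat) : Int :=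
  if c.1 = c.2 ∧ pvA adj c.1 c.2 ≠ 0 then a + 1 else a
def pvFT (adj : List (List Int)) (a : Int) (c : Nat × Nat) : Int :=
  if ¬ c.1 = c.2 ∧ c.1 < c.2 then a + pvA adj c.1 c.2 else a

-- normal forms everything is reduced to
def pvDegF (adj : List (List Int)) (N t : Nat) : Int :=
  ((List.range N).filter (fun j => decide (¬ j = t))).foldl (fun a j => a + pvA adj t j) 0
def pvInDegF (adj : List (List Int)) (N t : Nat) : Int :=
  ((List.range N).filter (fun k => decide (¬ k = t))).foldl (fun a k => a + pvA adj k t) 0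
def pvNbF (adj : List (List Int)) (N t : Nat) : List String :=
  ((List.range N).filter (fun j => decide (¬ j = t ∧ pvA adj t j ≠ 0))).map
    (fun (j : Nat) => "x" ++ PySem.Int.toStr ((j : Int) + 1))
def pvInNbF (adj : List (List Int)) (N t : Nat) : List String :=
  ((List.range N).filter (fun k => decide (¬ k = t ∧ pvA adj k t ≠ 0))).map
    (fun (k : Nat) => "x" ++ PySem.Int.toStr ((k : Int) + 1))

-- nested loop = flat loop over the concatenated per-row lists
theorem pvFoldFlat {α γ σ : Type} (l : List α) (g : α → List γ) (f : σ → γ → σ) (init : σ) :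
    l.foldl (fun st i => (g i).foldl f st) init = (l.flatMap g).foldl f init := by
  induction l generalizing init with
  | nil => rfl
  | cons a t ih => simp only [List.flatMap_cons, List.foldl_append, List.foldl_cons, ih]

-- getD after set, in range
theorem pvGetDSet {β : Type} (xs : List β) (n : Nat) (v d : β) (t : Nat) (h : n < xs.length) :
    (xs.set n v).getD t d = if t = n then v else xs.getD t d := by
  rw [List.getD_eq_getElem?_getD, List.getD_eq_getElem?_getD, List.getElem?_set]
  by_cases h1 : n = t
  · subst h1; simp [h]
  · rw [if_neg h1, if_neg (by omega : ¬ t = n)]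

-- scatter: one entry of an index-addressed accumulation loop is the fold over its own cells
theorem pvScatter {α β : Type} (xs : List α) (key : α → Nat) (P : α → Prop) [DecidablePred P]
    (upd : β → α → β) (d : β) (init : List β) (t : Nat)
    (hk : ∀ c ∈ xs, P c → key c < init.length) :
    ((xs.foldl (fun arr c => if P c then arr.set (key c) (upd (arr.getD (key c) d) c) else arr) init)).getD t d
    = (xs.filter (fun c => decide (P c) && (key c == t))).foldl upd (init.getD t d) := by
  induction xs generalizing init with
  | nil => rfl
  | cons c cs ih =>
    rw [List.foldl_cons, List.filter_cons]
    by_cases hp : P c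
    · have hlen : key c < init.length := hk c (by simp) hp
      have harr : (init.set (key c) (upd (init.getD (key c) d) c)).length = init.length :=
        List.length_set
      rw [if_pos hp, ih _ (fun x hx px => by rw [harr]; exact hk x (by simp [hx]) px)]
      by_cases ht : key c = t
      · subst ht
        simp only [hp, decide_true, Bool.true_and, beq_self_eq_true, if_true, List.foldl_cons]
        rw [pvGetDSet _ _ _ _ _ hlen, if_pos rfl]
      · have hbeq : (decide (P c) && (key c == t)) = false := by simp [ht]
        rw [hbeq, if_neg (by simp)]
        rw [pvGetDSet _ _ _ _ _ hlen, if_neg (by omega : ¬ t = key c)]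
    · have hbeq : (decide (P c) && (key c == t)) = false := by simp [hp]
      rw [if_neg hp, hbeq, if_neg (by simp), ih _ (fun x hx px => hk x (by simp [hx]) px)]

-- a fold whose step preserves length preserves length
theorem pvFoldLen {α β : Type} (xs : List α) (f : List β → α → List β)
    (h : ∀ a c, (f a c).length = a.length) (init : List β) :
    (xs.foldl f init).length = init.length := by
  induction xs generalizing init with
  | nil => rfl
  | cons c cs ih => rw [List.foldl_cons, ih, h]

-- flatMap of per-element optional singletons is a filtered map
theorem pvFlatMapIf {α γ : Type} (l : List α) (p : α → Prop) [DecidablePred p] (g : α → γ) :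
    l.flatMap (fun i => if p i then [g i] else []) = (l.filter (fun i => decide (p i))).map g := by
  induction l with
  | nil => rfl
  | cons a t ih =>
    rw [List.flatMap_cons, List.filter_cons]
    by_cases h : p a <;> simp [h, ih]

-- flatMap congruence
theorem pvFlatMapCongr {α γ : Type} (l : List α) (f g : α → List γ)
    (h : ∀ a ∈ l, f a = g a) : l.flatMap f = l.flatMap g := by
  induction l with
  | nil => rfl
  | cons a t ih =>
    rw [List.flatMap_cons, List.flatMap_cons, h a (by simp), ih (fun x hx => h x (by simp [hx]))]

-- flatMap over range of a family that vanishes away from t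
theorem pvFlatMapSelect {γ : Type} (N t : Nat) (f : Nat → List γ)
    (h : ∀ i, i ≠ t → f i = []) :
    (List.range N).flatMap f = if t < N then f t else [] := by
  induction N with
  | zero => simp
  | succ N ih =>
    rw [List.range_succ, List.flatMap_append, ih, List.flatMap_singleton]
    by_cases hN : N = t
    · subst hN
      rw [if_neg (Nat.lt_irrefl N), if_pos (Nat.lt_succ_self N)]
      simp
    · rw [h N hN, List.append_nil]
      by_cases ht : t < N
      · rw [if_pos ht, if_pos (by omega)]
      · rw [if_neg ht, if_neg (by omega)]

-- a range filtered for one value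
theorem pvFilterRangeEq (N t : Nat) (q : Nat → Bool) :
    (List.range N).filter (fun j => q j && (j == t)) = if t < N ∧ q t = true then [t] else [] := by
  induction N with
  | zero => simp
  | succ N ih =>
    rw [List.range_succ, List.filter_append, ih]
    by_cases hN : N = t
    · subst hN
      rw [if_neg (by omega : ¬ (N < N ∧ q N = true))]
      by_cases hq : q N = true
      · rw [if_pos ⟨by omega, hq⟩]; simp [hq]
      · rw [if_neg (by tauto)]; simp [hq]
    · have hb : (q N && (N == t)) = false := by simp [hN]
      simp only [List.filter_cons, List.filter_nil, hb, Bool.false_eq_true, if_false,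
        List.append_nil]
      by_cases hc : t < N ∧ q t = true
      · rw [if_pos hc, if_pos ⟨by omega, hc.2⟩]
      · rw [if_neg hc, if_neg (fun hh => hc ⟨by omega, hh.2⟩)]

-- the upper-triangle Int range is the filtered Nat range
theorem pvUpper (i N : Nat) :
    PySem.List.pyRange ((i : Int) + 1) (N : Int) 1
    = ((List.range N).filter (fun j => decide (i < j))).map (fun (j : Nat) => (j : Int)) := by
  induction N with
  | zero => rw [PySem.List.pyRange_one_eq_nil (by omega)]; simp
  | succ N ih =>
    rw [List.range_succ, List.filter_append]
    by_cases h : i < N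
    · have : ((N + 1 : Nat) : Int) = (N : Int) + 1 := by push_cast; ring
      rw [this, PySem.List.pyRange_one_succ_right (by omega), ih]
      simp [h]
    · have h1 : PySem.List.pyRange ((i : Int) + 1) ((N + 1 : Nat) : Int) 1 = [] :=
        PySem.List.pyRange_one_eq_nil (by push_cast; omega)
      have h2 : (List.range N).filter (fun j => decide (i < j)) = [] := by
        rw [List.filter_eq_nil_iff]
        intro j hj
        simp only [decide_eq_true_eq]
        have := List.mem_range.1 hj; omega
      rw [h1, h2]
      simp [h]

-- B's single pass, written per component over the flat cell list
theorem pvStEq (adj : List (List Int)) (N : Nat) :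
    ((PySem.List.pyRange 0 (N : Int) 1).foldl (fun st i =>
      (PySem.List.pyRange 0 (N : Int) 1).foldl (fun st j =>
        let v := pvAt adj i j
        if i = j then
          (if v ≠ 0 then (st.1, st.2.1, st.2.2.1 + 1, st.2.2.2) else st)
        else
          ((PySem.List.pySetD st.1.1 i (PySem.List.pyGetD st.1.1 i 0 + v),
            PySem.List.pySetD st.1.2 j (PySem.List.pyGetD st.1.2 j 0 + v)),
           (if v ≠ 0 then
              (PySem.List.pySetD st.2.1.1 i (PySem.List.pyGetD st.2.1.1 i [] ++ ["x" ++ PySem.Int.toStr (j + 1)]),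
               PySem.List.pySetD st.2.1.2 j (PySem.List.pyGetD st.2.1.2 j [] ++ ["x" ++ PySem.Int.toStr (i + 1)]))
            else st.2.1),
           st.2.2.1,
           (if j > i then st.2.2.2 + v else st.2.2.2))) st)
      ((List.replicate N (0 : Int), List.replicate N (0 : Int)),
       (List.replicate N ([] : List String), List.replicate N ([] : List String)), (0 : Int), (0 : Int)))
    = (((pvCells N).foldl (pvFOD adj) (List.replicate N 0),
        (pvCells N).foldl (pvFID adj) (List.replicate N 0)),
       ((pvCells N).foldl (pvFON adj) (List.replicate N []),
        (pvCells N).foldl (pvFIN adj) (List.replicate N [])),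
       (pvCells N).foldl (pvFL adj) 0,
       (pvCells N).foldl (pvFT adj) 0) := by
  rw [PySem.List.pyRange_zero_natCast, List.foldl_map]
  have hstep : ∀ (i : Nat)
      (st : (List Int × List Int) × (List (List String) × List (List String)) × Int × Int),
      (List.foldl (fun st (j : Int) =>
        let v := pvAt adj (i : Int) j
        if (i : Int) = j then
          (if v ≠ 0 then (st.1, st.2.1, st.2.2.1 + 1, st.2.2.2) else st)
        else
          ((PySem.List.pySetD st.1.1 (i : Int) (PySem.List.pyGetD st.1.1 (i : Int) 0 + v),
            PySem.List.pySetD st.1.2 j (PySem.List.pyGetD st.1.2 j 0 + v)),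
           (if v ≠ 0 then
              (PySem.List.pySetD st.2.1.1 (i : Int) (PySem.List.pyGetD st.2.1.1 (i : Int) [] ++ ["x" ++ PySem.Int.toStr (j + 1)]),
               PySem.List.pySetD st.2.1.2 j (PySem.List.pyGetD st.2.1.2 j [] ++ ["x" ++ PySem.Int.toStr ((i : Int) + 1)]))
            else st.2.1),
           st.2.2.1,
           (if j > (i : Int) then st.2.2.2 + v else st.2.2.2))) st
        (List.map (fun (k : Nat) => (k : Int)) (List.range N)))
      = ((List.range N).map (fun j => (i, j))).foldl (fun st c =>
          ((pvFOD adj st.1.1 c, pvFID adj st.1.2 c),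
           (pvFON adj st.2.1.1 c, pvFIN adj st.2.1.2 c),
           pvFL adj st.2.2.1 c, pvFT adj st.2.2.2 c)) st := by
    intro i st
    rw [List.foldl_map, List.foldl_map]
    refine PySem.List.foldl_congr_mem _ _ _ _ (fun st j _ => ?_)
    simp only [pvFOD, pvFID, pvFON, pvFIN, pvFL, pvFT, pvA, PySem.List.pySetD_natCast,
      PySem.List.pyGetD_natCast, Nat.cast_inj, gt_iff_lt, Nat.cast_lt]
    by_cases hij : i = j
    · subst hij
      by_cases hv : pvAt adj (i : Int) (i : Int) ≠ 0
      · simp [hv]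
      · simp [hv]
    · by_cases hv : pvAt adj (i : Int) (j : Int) ≠ 0
      · by_cases hlt : i < j <;> simp [hij, hv, hlt]
      · by_cases hlt : i < j <;> simp [hij, hv, hlt]
  refine (PySem.List.foldl_congr_mem _ _ _ _ (fun st i _ => hstep i st)).trans ?_
  have hflat := pvFoldFlat (List.range N) (fun i => (List.range N).map (fun j => (i, j)))
      (fun st (c : Nat × Nat) =>
          ((pvFOD adj st.1.1 c, pvFID adj st.1.2 c),
           (pvFON adj st.2.1.1 c, pvFIN adj st.2.1.2 c),
           pvFL adj st.2.2.1 c, pvFT adj st.2.2.2 c))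
      ((List.replicate N (0 : Int), List.replicate N (0 : Int)),
       (List.replicate N ([] : List String), List.replicate N ([] : List String)), (0 : Int), (0 : Int))
  refine hflat.trans ?_
  rw [← pvCells]
  rw [PySem.List.foldl_prod_mk
        (f := fun (p : List Int × List Int) (c : Nat × Nat) => (pvFOD adj p.1 c, pvFID adj p.2 c))
        (g := fun (q : (List (List String) × List (List String)) × Int × Int) (c : Nat × Nat) =>
          ((pvFON adj q.1.1 c, pvFIN adj q.1.2 c), pvFL adj q.2.1 c, pvFT adj q.2.2 c))]
  rw [PySem.List.foldl_prod_mk (f := pvFOD adj) (g := pvFID adj)]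
  rw [PySem.List.foldl_prod_mk
        (f := fun (r : List (List String) × List (List String)) (c : Nat × Nat) =>
          (pvFON adj r.1 c, pvFIN adj r.2 c))
        (g := fun (w : Int × Int) (c : Nat × Nat) => (pvFL adj w.1 c, pvFT adj w.2 c))]
  rw [PySem.List.foldl_prod_mk (f := pvFON adj) (g := pvFIN adj),
      PySem.List.foldl_prod_mk (f := pvFL adj) (g := pvFT adj)]

-- membership in the cell list bounds both coordinates
theorem pvMemCells (N : Nat) (c : Nat × Nat) (h : c ∈ pvCells N) : c.1 < N ∧ c.2 < N := by
  unfold pvCells at h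
  obtain ⟨i, hi, hc⟩ := List.mem_flatMap.1 h
  obtain ⟨j, hj, rfl⟩ := List.mem_map.1 hc
  exact ⟨List.mem_range.1 hi, List.mem_range.1 hj⟩

-- filtering the cell list row by row
theorem pvCellsFilter (N : Nat) (p : Nat × Nat → Bool) :
    (pvCells N).filter p
    = (List.range N).flatMap (fun i => ((List.range N).filter (fun j => p (i, j))).map (fun j => (i, j))) := by
  unfold pvCells
  rw [List.filter_flatMap]
  exact pvFlatMapCongr _ _ _ (fun i _ => by rw [List.filter_map]; rfl)

-- B's loop counter = A's loop scan
theorem pvLoopsEq (adj : List (List Int)) (N : Nat) :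
    (pvCells N).foldl (pvFL adj) 0
    = (PySem.List.pyRange 0 (N : Int) 1).foldl (fun a i => if pvAt adj i i ≠ 0 then a + 1 else a) 0 := by
  rw [PySem.List.pyRange_zero_natCast, List.foldl_map]
  unfold pvFL
  rw [PySem.List.foldl_ite_eq_foldl_filter (fun c : Nat × Nat => c.1 = c.2 ∧ pvA adj c.1 c.2 ≠ 0)
        (fun a _ => a + 1),
      PySem.List.foldl_ite_eq_foldl_filter (fun i : Nat => pvAt adj i i ≠ 0) (fun a _ => a + 1),
      pvCellsFilter]
  have hrow : ∀ i ∈ List.range N,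
      ((List.range N).filter (fun j => decide (i = j ∧ pvA adj i j ≠ 0))).map (fun j => (i, j))
      = if pvA adj i i ≠ 0 then [(i, i)] else [] := by
    intro i _
    have : (List.range N).filter (fun j => decide (i = j ∧ pvA adj i j ≠ 0))
        = (List.range N).filter (fun j => decide (pvA adj i j ≠ 0) && (j == i)) := by
      refine List.filter_congr (fun j _ => ?_)
      by_cases h1 : i = j <;> by_cases h2 : pvA adj i j ≠ 0 <;> (simp [h1, h2]; try omega)
    rw [this, pvFilterRangeEq]
    by_cases hd : pvA adj i i ≠ 0
    · rw [if_pos ⟨List.mem_range.1 ‹i ∈ List.range N›, by simpa using hd⟩, if_pos hd]; rfl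
    · rw [if_neg (fun hh => hd (by simpa using hh.2)), if_neg hd]; rfl
  rw [pvFlatMapCongr _ _ _ hrow, pvFlatMapIf (List.range N) (fun i => pvA adj i i ≠ 0) (fun i => (i, i)),
      List.foldl_map]
  exact PySem.List.foldl_congr_mem _ _ _ _ (fun a i _ => rfl) |>.symm ▸ rfl
  
-- B's triangle accumulator = A's upper-triangle scan
theorem pvTriEq (adj : List (List Int)) (N : Nat) :
    (pvCells N).foldl (pvFT adj) 0
    = (PySem.List.pyRange 0 (N : Int) 1).foldl (fun a i =>
        (PySem.List.pyRange (i + 1) (N : Int) 1).foldl (fun b j => b + pvAt adj i j) a) 0 := by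
  rw [PySem.List.pyRange_zero_natCast, List.foldl_map]
  unfold pvFT
  rw [PySem.List.foldl_ite_eq_foldl_filter (fun c : Nat × Nat => ¬ c.1 = c.2 ∧ c.1 < c.2)
        (fun a c => a + pvA adj c.1 c.2),
      pvCellsFilter]
  have hrow : ∀ i, (List.range N).filter (fun j => decide (¬ i = j ∧ i < j))
      = (List.range N).filter (fun j => decide (i < j)) := by
    intro i
    refine List.filter_congr (fun j _ => ?_)
    by_cases h : i < j <;> (simp [h]; try omega)
  have hflat := pvFoldFlat (List.range N)
      (fun i => ((List.range N).filter (fun j => decide (i < j))).map (fun j => (i, j)))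
      (fun (a : Int) (c : Nat × Nat) => a + pvA adj c.1 c.2) 0
  rw [pvFlatMapCongr _ _ _ (fun i _ => by rw [hrow i]), ← hflat]
  refine PySem.List.foldl_congr_mem _ _ _ _ (fun a i _ => ?_)
  rw [pvUpper]
  simp only [List.foldl_map]
  exact PySem.List.foldl_congr_mem _ _ _ _ (fun b j _ => by simp [pvA])

-- A's per-vertex degree scan as a filtered Nat fold
theorem pvDegAEq (adj : List (List Int)) (N t : Nat) :
    (PySem.List.pyRange 0 (N : Int) 1).foldl
      (fun a j => if j ≠ (t : Int) then a + pvAt adj t j else a) 0 = pvDegF adj N t := by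
  rw [PySem.List.pyRange_zero_natCast, List.foldl_map]
  unfold pvDegF
  rw [PySem.List.foldl_ite_eq_foldl_filter (fun j : Nat => (j : Int) ≠ (t : Int))
        (fun a (j : Nat) => a + pvAt adj t j)]
  rw [List.filter_congr (fun j _ => by simp :
        ∀ j ∈ List.range N, (decide ((j : Int) ≠ (t : Int))) = (decide (¬ j = t)))]
  exact PySem.List.foldl_congr_mem _ _ _ _ (fun a j _ => by simp [pvA])

-- A's degree scan started at an arbitrary accumulator
theorem pvDegShift (adj : List (List Int)) (N t : Nat) (a : Int) :
    (PySem.List.pyRange 0 (N : Int) 1).foldl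
      (fun b j => if j ≠ (t : Int) then b + pvAt adj t j else b) a = a + pvDegF adj N t := by
  rw [PySem.List.pyRange_zero_natCast, List.foldl_map]
  rw [PySem.List.foldl_ite_eq_foldl_filter (fun j : Nat => (j : Int) ≠ (t : Int))
        (fun b (j : Nat) => b + pvAt adj t j)]
  rw [List.filter_congr (fun j _ => by simp :
        ∀ j ∈ List.range N, (decide ((j : Int) ≠ (t : Int))) = (decide (¬ j = t)))]
  rw [PySem.List.foldl_congr_mem _ _ (fun b (j : Nat) => b + pvA adj t j) _
        (fun b j _ => by simp [pvA])]
  unfold pvDegF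
  rw [PySem.List.foldl_add, PySem.List.foldl_add]
  ring

-- A's in-degree scan as a filtered Nat fold
theorem pvInDegAEq (adj : List (List Int)) (N t : Nat) :
    (PySem.List.pyRange 0 (N : Int) 1).foldl
      (fun a k => if k ≠ (t : Int) then a + pvAt adj k t else a) 0 = pvInDegF adj N t := by
  rw [PySem.List.pyRange_zero_natCast, List.foldl_map]
  rw [PySem.List.foldl_ite_eq_foldl_filter (fun k : Nat => (k : Int) ≠ (t : Int))
        (fun a (k : Nat) => a + pvAt adj k t)]
  rw [List.filter_congr (fun k _ => by simp :
        ∀ k ∈ List.range N, (decide ((k : Int) ≠ (t : Int))) = (decide (¬ k = t)))]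
  exact PySem.List.foldl_congr_mem _ _ _ _ (fun a k _ => by simp [pvA])

-- A's neighbour-list scans as filtered Nat maps
theorem pvNbAEq (adj : List (List Int)) (N t : Nat) :
    (PySem.List.pyRange 0 (N : Int) 1).foldl
      (fun a j => if j ≠ (t : Int) ∧ pvAt adj t j ≠ 0 then a ++ ["x" ++ PySem.Int.toStr (j + 1)] else a) []
    = pvNbF adj N t := by
  rw [PySem.List.pyRange_zero_natCast, List.foldl_map]
  rw [PySem.List.foldl_append_ite (fun j : Nat => (j : Int) ≠ (t : Int) ∧ pvAt adj t j ≠ 0)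
        (fun j : Nat => "x" ++ PySem.Int.toStr ((j : Int) + 1)), List.nil_append]
  unfold pvNbF
  rw [List.filter_congr (fun j _ => by simp [pvA] :
        ∀ j ∈ List.range N, (decide ((j : Int) ≠ (t : Int) ∧ pvAt adj t j ≠ 0))
          = (decide (¬ j = t ∧ pvA adj t j ≠ 0)))]

theorem pvInNbAEq (adj : List (List Int)) (N t : Nat) :
    (PySem.List.pyRange 0 (N : Int) 1).foldl
      (fun a k => if k ≠ (t : Int) ∧ pvAt adj k t ≠ 0 then a ++ ["x" ++ PySem.Int.toStr (k + 1)] else a) []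
    = pvInNbF adj N t := by
  rw [PySem.List.pyRange_zero_natCast, List.foldl_map]
  rw [PySem.List.foldl_append_ite (fun k : Nat => (k : Int) ≠ (t : Int) ∧ pvAt adj k t ≠ 0)
        (fun k : Nat => "x" ++ PySem.Int.toStr ((k : Int) + 1)), List.nil_append]
  unfold pvInNbF
  rw [List.filter_congr (fun k _ => by simp [pvA] :
        ∀ k ∈ List.range N, (decide ((k : Int) ≠ (t : Int) ∧ pvAt adj k t ≠ 0))
          = (decide (¬ k = t ∧ pvA adj k t ≠ 0)))]

-- entry t of B's out-degree table
theorem pvOutDGet (adj : List (List Int)) (N t : Nat) (ht : t < N) :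
    ((pvCells N).foldl (pvFOD adj) (List.replicate N 0)).getD t 0 = pvDegF adj N t := by
  have hsc := pvScatter (pvCells N) (fun c : Nat × Nat => c.1) (fun c : Nat × Nat => ¬ c.1 = c.2)
      (fun (a : Int) (c : Nat × Nat) => a + pvA adj c.1 c.2) 0 (List.replicate N 0) t
      (fun c hc _ => by rw [List.length_replicate]; exact (pvMemCells N c hc).1)
  refine Eq.trans (by exact hsc) ?_
  rw [List.getD_replicate 0 ht, pvCellsFilter]
  have hrow : ∀ i, i ≠ t →
      ((List.range N).filter (fun j => decide (¬ i = j) && (i == t))).map (fun j => (i, j)) = [] := by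
    intro i hi
    have : (List.range N).filter (fun j => decide (¬ i = j) && (i == t)) = [] := by
      rw [List.filter_eq_nil_iff]; intro j _; simp [hi]
    rw [this]; rfl
  rw [pvFlatMapSelect N t _ hrow, if_pos ht]
  rw [List.filter_congr (fun j _ => by
        by_cases h : j = t
        · subst h; simp
        · have h' : ¬ t = j := fun hh => h hh.symm
          simp [h, h'] :
        ∀ j ∈ List.range N, (decide (¬ t = j) && (t == t)) = (decide (¬ j = t)))]
  rw [List.foldl_map]
  rfl

-- entry t of B's in-degree table
theorem pvInDGet (adj : List (List Int)) (N t : Nat) (ht : t < N) :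
    ((pvCells N).foldl (pvFID adj) (List.replicate N 0)).getD t 0 = pvInDegF adj N t := by
  have hsc := pvScatter (pvCells N) (fun c : Nat × Nat => c.2) (fun c : Nat × Nat => ¬ c.1 = c.2)
      (fun (a : Int) (c : Nat × Nat) => a + pvA adj c.1 c.2) 0 (List.replicate N 0) t
      (fun c hc _ => by rw [List.length_replicate]; exact (pvMemCells N c hc).2)
  refine Eq.trans (by exact hsc) ?_
  rw [List.getD_replicate 0 ht, pvCellsFilter]
  have hrow : ∀ i ∈ List.range N,
      ((List.range N).filter (fun j => decide (¬ i = j) && (j == t))).map (fun j => (i, j))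
      = if ¬ i = t then [(i, t)] else [] := by
    intro i _
    rw [pvFilterRangeEq]
    by_cases hi : i = t
    · subst hi; rw [if_neg (by simp), if_neg (by simp)]; rfl
    · rw [if_pos ⟨ht, by simp [hi]⟩, if_pos hi]; rfl
  rw [pvFlatMapCongr _ _ _ hrow, pvFlatMapIf (List.range N) (fun i => ¬ i = t) (fun i => (i, t)),
      List.foldl_map]
  rfl

-- entry t of B's out-neighbour table
theorem pvONGet (adj : List (List Int)) (N t : Nat) (ht : t < N) :
    ((pvCells N).foldl (pvFON adj) (List.replicate N [])).getD t [] = pvNbF adj N t := by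
  have hsc := pvScatter (pvCells N) (fun c : Nat × Nat => c.1)
      (fun c : Nat × Nat => ¬ c.1 = c.2 ∧ pvA adj c.1 c.2 ≠ 0)
      (fun (a : List String) (c : Nat × Nat) => a ++ ["x" ++ PySem.Int.toStr ((c.2 : Int) + 1)])
      [] (List.replicate N []) t
      (fun c hc _ => by rw [List.length_replicate]; exact (pvMemCells N c hc).1)
  refine Eq.trans (by exact hsc) ?_
  rw [List.getD_replicate [] ht, pvCellsFilter]
  have hrow : ∀ i, i ≠ t →
      ((List.range N).filter (fun j => decide (¬ i = j ∧ pvA adj i j ≠ 0) && (i == t))).map (fun j => (i, j)) = [] := by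
    intro i hi
    have : (List.range N).filter (fun j => decide (¬ i = j ∧ pvA adj i j ≠ 0) && (i == t)) = [] := by
      rw [List.filter_eq_nil_iff]; intro j _; simp [hi]
    rw [this]; rfl
  rw [pvFlatMapSelect N t _ hrow, if_pos ht]
  rw [List.filter_congr (fun j _ => by
        by_cases h : j = t
        · subst h; simp
        · have h' : ¬ t = j := fun hh => h hh.symm
          simp [h, h'] :
        ∀ j ∈ List.range N, (decide (¬ t = j ∧ pvA adj t j ≠ 0) && (t == t))
          = (decide (¬ j = t ∧ pvA adj t j ≠ 0)))]
  rw [List.foldl_map]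
  rw [PySem.List.foldl_append_singleton_eq_map]
  simp [pvNbF]

-- entry t of B's in-neighbour table
theorem pvINGet (adj : List (List Int)) (N t : Nat) (ht : t < N) :
    ((pvCells N).foldl (pvFIN adj) (List.replicate N [])).getD t [] = pvInNbF adj N t := by
  have hsc := pvScatter (pvCells N) (fun c : Nat × Nat => c.2)
      (fun c : Nat × Nat => ¬ c.1 = c.2 ∧ pvA adj c.1 c.2 ≠ 0)
      (fun (a : List String) (c : Nat × Nat) => a ++ ["x" ++ PySem.Int.toStr ((c.1 : Int) + 1)])
      [] (List.replicate N []) t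
      (fun c hc _ => by rw [List.length_replicate]; exact (pvMemCells N c hc).2)
  refine Eq.trans (by exact hsc) ?_
  rw [List.getD_replicate [] ht, pvCellsFilter]
  have hrow : ∀ i ∈ List.range N,
      ((List.range N).filter (fun j => decide (¬ i = j ∧ pvA adj i j ≠ 0) && (j == t))).map (fun j => (i, j))
      = if ¬ i = t ∧ pvA adj i t ≠ 0 then [(i, t)] else [] := by
    intro i _
    rw [pvFilterRangeEq]
    by_cases hi : i = t
    · subst hi; rw [if_neg (by simp), if_neg (by simp)]; rfl
    · by_cases hv : pvA adj i t ≠ 0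
      · rw [if_pos ⟨ht, by simp [hi, hv]⟩, if_pos ⟨hi, hv⟩]; rfl
      · rw [if_neg (fun hh => hv (by simpa [hi] using hh.2)), if_neg (fun hh => hv hh.2)]; rfl
  rw [pvFlatMapCongr _ _ _ hrow,
      pvFlatMapIf (List.range N) (fun i => ¬ i = t ∧ pvA adj i t ≠ 0) (fun i => (i, t)),
      List.foldl_map]
  rw [PySem.List.foldl_append_singleton_eq_map]
  simp [pvInNbF]

-- pvFOD preserves length
theorem pvFODLen (adj : List (List Int)) (a : List Int) (c : Nat × Nat) :
    (pvFOD adj a c).length = a.length := by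
  unfold pvFOD; split_ifs <;> simp

-- B's out-degree table as a whole
theorem pvOutDList (adj : List (List Int)) (N : Nat) :
    (pvCells N).foldl (pvFOD adj) (List.replicate N 0) = (List.range N).map (fun t => pvDegF adj N t) := by
  have hlen : ((pvCells N).foldl (pvFOD adj) (List.replicate N 0)).length = N := by
    rw [pvFoldLen _ _ (pvFODLen adj), List.length_replicate]
  refine List.ext_getElem (by simp [hlen]) ?_
  intro t ht1 ht2
  have htN : t < N := by simpa [hlen] using ht1
  rw [List.getElem_map, List.getElem_range]
  rw [← List.getD_eq_getElem _ 0 ht1]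
  exact pvOutDGet adj N t htN

-- A's directed edge double scan is the total of the out-degrees
theorem pvEdgesDirEq (adj : List (List Int)) (N : Nat) :
    (PySem.List.pyRange 0 (N : Int) 1).foldl (fun a i =>
        (PySem.List.pyRange 0 (N : Int) 1).foldl (fun b j => if j ≠ i then b + pvAt adj i j else b) a) 0
    = ((List.range N).map (fun t => pvDegF adj N t)).sum := by
  rw [PySem.List.pyRange_zero_natCast, List.foldl_map]
  rw [PySem.List.foldl_congr_mem _ _ (fun a (i : Nat) => a + pvDegF adj N i) _
        (fun a i _ => by rw [← PySem.List.pyRange_zero_natCast]; exact pvDegShift adj N i a)]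
  rw [PySem.List.foldl_add, zero_add]

-- A's footer degree total is the same sum
theorem pvTotalEq (adj : List (List Int)) (N : Nat) :
    (PySem.List.pyRange 0 (N : Int) 1).foldl (fun a i =>
        a + (PySem.List.pyRange 0 (N : Int) 1).foldl (fun b j => if j ≠ i then b + pvAt adj i j else b) 0) 0
    = ((List.range N).map (fun t => pvDegF adj N t)).sum := by
  rw [PySem.List.pyRange_zero_natCast, List.foldl_map]
  rw [PySem.List.foldl_congr_mem _ _ (fun a (i : Nat) => a + pvDegF adj N i) _
        (fun a i _ => by
          rw [← PySem.List.pyRange_zero_natCast, pvDegShift adj N i 0, zero_add])]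
  rw [PySem.List.foldl_add, zero_add]

-- the format loops of the two ports agree (given the tables' characterizations)
theorem pvFormatEq (adj : List (List Int)) (N : Nat) (gtype : String) (init : List String) :
    (PySem.List.pyRange 0 (N : Int) 1).foldl (fun ls i =>
      let lp : String := if pvAt adj i i ≠ 0 then " ⟲" else ""
      if gtype = "directed" then
        let out_d : Int := (PySem.List.pyRange 0 (N : Int) 1).foldl
          (fun a j => if j ≠ i then a + pvAt adj i j else a) 0
        let in_d : Int := (PySem.List.pyRange 0 (N : Int) 1).foldl
          (fun a k => if k ≠ i then a + pvAt adj k i else a) 0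
        let G : List String := (PySem.List.pyRange 0 (N : Int) 1).foldl
          (fun a j => if j ≠ i ∧ pvAt adj i j ≠ 0 then a ++ ["x" ++ PySem.Int.toStr (j + 1)] else a) []
        let Ginv : List String := (PySem.List.pyRange 0 (N : Int) 1).foldl
          (fun a k => if k ≠ i ∧ pvAt adj k i ≠ 0 then a ++ ["x" ++ PySem.Int.toStr (k + 1)] else a) []
        ls ++ ["  x" ++ PySem.Int.toStr (i + 1) ++ lp ++ ": вихід=" ++ PySem.Int.toStr out_d ++ " Г=" ++ pvReprStrList G,
               "       захід=" ++ PySem.Int.toStr in_d ++ " Г⁻¹=" ++ pvReprStrList Ginv]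
      else
        let deg : Int := (PySem.List.pyRange 0 (N : Int) 1).foldl
          (fun a j => if j ≠ i then a + pvAt adj i j else a) 0
        let nbrs : List String := (PySem.List.pyRange 0 (N : Int) 1).foldl
          (fun a j => if j ≠ i ∧ pvAt adj i j ≠ 0 then a ++ ["x" ++ PySem.Int.toStr (j + 1)] else a) []
        ls ++ ["  x" ++ PySem.Int.toStr (i + 1) ++ lp ++ ": deg=" ++ PySem.Int.toStr deg ++ "  Г=" ++ pvReprStrList nbrs]) init
    = (PySem.List.pyRange 0 (N : Int) 1).foldl (fun ls i =>
      let lp : String := if pvAt adj i i ≠ 0 then " ⟲" else ""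
      if gtype = "directed" then
        ls ++ ["  x" ++ PySem.Int.toStr (i + 1) ++ lp ++ ": вихід=" ++
                 PySem.Int.toStr (PySem.List.pyGetD ((pvCells N).foldl (pvFOD adj) (List.replicate N 0)) i 0) ++
                 " Г=" ++ pvReprStrList (PySem.List.pyGetD ((pvCells N).foldl (pvFON adj) (List.replicate N [])) i []),
               "       захід=" ++ PySem.Int.toStr (PySem.List.pyGetD ((pvCells N).foldl (pvFID adj) (List.replicate N 0)) i 0) ++
                 " Г⁻¹=" ++ pvReprStrList (PySem.List.pyGetD ((pvCells N).foldl (pvFIN adj) (List.replicate N [])) i [])]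
      else
        ls ++ ["  x" ++ PySem.Int.toStr (i + 1) ++ lp ++ ": deg=" ++
                 PySem.Int.toStr (PySem.List.pyGetD ((pvCells N).foldl (pvFOD adj) (List.replicate N 0)) i 0) ++
                 "  Г=" ++ pvReprStrList (PySem.List.pyGetD ((pvCells N).foldl (pvFON adj) (List.replicate N [])) i [])]) init := by
  refine PySem.List.foldl_congr_mem _ _ _ _ (fun ls i hi => ?_)
  obtain ⟨h0, hlt⟩ := (PySem.List.mem_pyRange_one).1 hi
  obtain ⟨t, rfl⟩ : ∃ t : Nat, i = (t : Int) := ⟨i.toNat, (Int.toNat_of_nonneg h0).symm⟩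
  have htN : t < N := by exact_mod_cast hlt
  simp only [PySem.List.pyGetD_natCast]
  rw [pvDegAEq adj N t, pvInDegAEq adj N t, pvNbAEq adj N t, pvInNbAEq adj N t,
      pvOutDGet adj N t htN, pvInDGet adj N t htN, pvONGet adj N t htN, pvINGet adj N t htN]

-- ===== VERDICT (by name: the statement is the Claim_ definition above) =====
theorem graph_stats_spec : Claim_equal_graph_stats := by
  intro adj gtype _ _
  unfold Spec_graph_stats
  show graph_stats adj gtype = graph_stats_alt adj gtype
  simp only [graph_stats, graph_stats_alt, PySem.List.len_eq, Int.toNat_natCast]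
  by_cases hn : (adj.length : Int) = 0
  · rw [if_pos hn, if_pos hn]
  rw [if_neg hn, if_neg hn]
  rw [pvStEq adj adj.length]
  rw [pvFormatEq adj adj.length gtype, pvLoopsEq adj adj.length, pvTriEq adj adj.length,
      pvOutDList adj adj.length, pvEdgesDirEq adj adj.length, pvTotalEq adj adj.length]
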